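-- pv_equiv track=rewrite | github.com/RonBeavis/SE | load_kernel.py | generate_vstack
-- ===== SOURCE A (Python) =====
-- import itertools
--
-- def generate_vstack(_mods,_pos,_depth = 3):
-- 	v_stack = []
-- 	vs_pos = {}
-- 	master_list = []
-- #
-- #	create an empty vs_pos dict (unmodified)
-- #	and generate a list of the possible modifications
-- #	where each element is a tuple of (residue,position)
-- #
-- 	v = ''
-- 	for v in _mods:
-- 		vs_pos[v] = []
-- 		if v not in _pos:
-- 			continue
-- 		else:
-- 			for p in _pos[v]:
-- 				master_list.append((v,p))
-- 	vs_item = [vs_pos,0]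
-- 	v_stack.append(vs_item)
-- 	d = 1
-- #
-- #	iterate to the specified depth of modification
-- #
-- 	deamidated = 0
-- 	dm = 0
-- 	m_list = []
-- 	ml = ()
-- 	mod_mass = 0
-- 	mod_len = 0
-- 	while d <= _depth:
-- #
-- #		generate a list of all possible combinations of "d" modifications
-- #
-- 		m_list = list(itertools.combinations(master_list,d))
-- #
-- #		iterate through the modification combinations to create
-- #		the structures used to update the b and y ion lists
-- #		and supply the peptide mass change caused by the modifications
-- #
-- 		for ml in m_list:
-- 			deamidated = 0
-- 			dm = 0
-- 			vs_pos = {}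
-- 			for v in _mods:
-- 				if v not in _pos:
-- 					continue
-- 				vs_pos[v] = [x[1] for x in ml if x[0] == v]
-- 				mod_mass = _mods[v][0]
-- 				mod_len = len(vs_pos[v])
-- 				dm += mod_mass * mod_len
-- 				if _mods[v][0] == 984:
-- 					deamidated += mod_len
-- 			if deamidated > 1:
-- 				continue
-- 			v_stack.append([vs_pos,dm])
-- 		d += 1
-- 	return v_stack
-- ===== SOURCE B (Python) =====
-- def generate_vstack(_mods, _pos, _depth=3):
--     # One pruned DFS over index-increasing prefixes instead of per-depth
--     # itertools.combinations with a full rescan of every combination.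
--     residues = [v for v in _mods if v in _pos]
--     master = [(v, p) for v in residues for p in _pos[v]]
--     maxd = min(_depth, len(master))
--     if maxd < 0:
--         maxd = 0
--     buckets = [[] for _ in range(maxd + 1)]
--     vs = {v: [] for v in residues}
--
--     def extend(rest, size, dm, deam):
--         for j, (r, p) in enumerate(rest):
--             m = _mods[r][0]
--             nd = deam + (1 if m == 984 else 0)
--             if nd > 1:
--                 continue  # every further extension stays deamidated > 1
--             vs[r].append(p)
--             buckets[size + 1].append([{v: list(ps) for v, ps in vs.items()}, dm + m])
--             if size + 1 < maxd:
--                 extend(rest[j + 1:], size + 1, dm + m, nd)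
--             vs[r].pop()
--
--     if maxd > 0:
--         extend(master, 0, 0, 0)
--     out = [[{v: [] for v in _mods}, 0]]
--     for b in buckets[1:]:
--         out.extend(b)
--     return out
-- ===== Notes on version B (the rewrite author's own statement) =====
-- stated objective: alternative
-- what changed: B replaces A's per-depth itertools.combinations sweeps (each combination rescanned residue by residue against the whole _mods dict) with a single recursive DFS over index-increasing prefixes of the master list that maintains the position grouping, mass delta and deamidation count incrementally and prunes any branch whose deamidation count already exceeds 1, collecting entries into per-size buckets that are concatenated in depth order.
import Mathlib
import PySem

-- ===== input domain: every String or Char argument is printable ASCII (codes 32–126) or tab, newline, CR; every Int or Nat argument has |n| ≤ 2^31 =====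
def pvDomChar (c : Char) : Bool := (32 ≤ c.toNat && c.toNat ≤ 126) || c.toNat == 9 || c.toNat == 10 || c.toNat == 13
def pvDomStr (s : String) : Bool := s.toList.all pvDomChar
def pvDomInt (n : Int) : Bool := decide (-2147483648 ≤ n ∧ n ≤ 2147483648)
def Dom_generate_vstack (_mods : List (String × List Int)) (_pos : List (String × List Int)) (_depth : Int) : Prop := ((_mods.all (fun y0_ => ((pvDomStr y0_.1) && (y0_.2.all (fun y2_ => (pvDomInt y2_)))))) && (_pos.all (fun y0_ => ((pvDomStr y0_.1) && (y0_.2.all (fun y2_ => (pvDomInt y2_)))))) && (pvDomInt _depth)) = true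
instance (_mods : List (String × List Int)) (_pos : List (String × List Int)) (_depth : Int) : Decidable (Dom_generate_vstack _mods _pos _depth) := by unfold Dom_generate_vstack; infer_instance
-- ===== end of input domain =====

-- B replaces A's per-depth itertools.combinations sweeps (each combination rescanned
-- residue by residue) with one pruned DFS over index-increasing prefixes that maintains
-- the position grouping, mass delta and deamidation count incrementally; equal output.

-- ===== PORT A =====
-- itertools.combinations(l, n) in Python's emission order
def pyCombos {α : Type} : Nat → List α → List (List α)
  | 0, _ => [[]]
  | _ + 1, [] => []
  | n + 1, x :: xs => ((pyCombos n xs).map (fun c => x :: c)) ++ pyCombos (n + 1) xs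
termination_by structural _ l => l

def generate_vstack (_mods : List (String × List Int)) (_pos : List (String × List Int)) (_depth : Int) : List ((List (String × List Int)) × Int) :=
  -- the Python function receives its two arguments as dicts
  let mods := PySem.Dict.ofList _mods
  let pos := PySem.Dict.ofList _pos
  -- first loop: vs_pos[v] = [] for every key, master_list of (residue, position)
  let st0 := mods.keys.foldl
    (fun (st : PySem.Dict String (List Int) × List (String × Int)) v =>
      (st.1.insert v ([] : List Int),
       if pos.contains v then st.2 ++ (pos.getD v []).map (fun p => (v, p)) else st.2))
    (PySem.Dict.empty, [])
  let vs_pos0 := st0.1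
  let master_list := st0.2
  let v_stack : List ((List (String × List Int)) × Int) := [(vs_pos0.items, 0)]
  -- while d <= _depth
  (PySem.List.pyRange 1 (_depth + 1)).foldl (fun v_stack d =>
    let m_list := pyCombos d.toNat master_list
    m_list.foldl (fun v_stack ml =>
      let st := mods.keys.foldl
        (fun (st : PySem.Dict String (List Int) × Int × Int) v =>
          if pos.contains v then
            (st.1.insert v ((ml.filter (fun x => x.1 == v)).map (fun x => x.2)),
             -- _mods[v][0]: Pre_ excludes the IndexError of an empty mass list
             st.2.1 + (mods.getD v []).headD 0 * (((ml.filter (fun x => x.1 == v)).map (fun x => x.2)).length : Int),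
             if (mods.getD v []).headD 0 == 984 then st.2.2 + (((ml.filter (fun x => x.1 == v)).map (fun x => x.2)).length : Int) else st.2.2)
          else st)
        (PySem.Dict.empty, 0, 0)
      if st.2.2 > 1 then v_stack else v_stack ++ [(st.1.items, st.2.1)])
      v_stack)
    v_stack

-- ===== PORT B =====
-- the recursive extend(rest, size, dm, deam) of Source B; fuel = len(rest) bound makes the
-- recursion structural, top call passes fuel = master.length
def vstackExtend (mods : PySem.Dict String (List Int)) (maxd : Nat) :
    Nat → List (String × Int) → PySem.Dict String (List Int) → Nat → Int → Int →
    List (List ((List (String × List Int)) × Int)) → List (List ((List (String × List Int)) × Int))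
  | _, [], _, _, _, _, buckets => buckets
  | 0, _ :: _, _, _, _, _, buckets => buckets
  | fuel + 1, (r, p) :: xs, vs, size, dm, deam, buckets =>
    let m := (mods.getD r []).headD 0
    let nd := deam + (if m == 984 then 1 else 0)
    let buckets :=
      if 1 < nd then buckets   -- prune: every extension keeps deamidated > 1
      else
        let vs' := vs.modify r [] (fun b => b ++ [p])
        let b' := buckets.modify (size + 1) (fun b => b ++ [(vs'.items, dm + m)])
        if size + 1 < maxd then vstackExtend mods maxd fuel xs vs' (size + 1) (dm + m) nd b' else b'
    vstackExtend mods maxd fuel xs vs size dm deam buckets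
termination_by structural fuel _ => fuel

def generate_vstack_alt (_mods : List (String × List Int)) (_pos : List (String × List Int)) (_depth : Int) : List ((List (String × List Int)) × Int) :=
  let mods := PySem.Dict.ofList _mods
  let pos := PySem.Dict.ofList _pos
  let residues := mods.keys.filter (fun v => pos.contains v)
  let master := residues.flatMap (fun v => (pos.getD v []).map (fun p => (v, p)))
  let maxd : Nat := (min _depth (master.length : Int)).toNat
  let vs0 := residues.foldl (fun d v => d.insert v ([] : List Int)) PySem.Dict.empty
  let buckets0 := List.replicate (maxd + 1) ([] : List ((List (String × List Int)) × Int))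
  let buckets := if 0 < maxd then vstackExtend mods maxd master.length master vs0 0 0 0 buckets0 else buckets0
  let out : List ((List (String × List Int)) × Int) :=
    [((mods.keys.foldl (fun d v => d.insert v ([] : List Int)) PySem.Dict.empty).items, 0)]
  (buckets.drop 1).foldl (fun out b => out ++ b) out

-- ===== PRECONDITION & SPEC =====
-- Pre_ excludes exactly the inputs where Python A raises IndexError: the combination
-- loop runs (_depth ≥ 1 and some residue of _mods has positions in _pos) while some
-- residue of _mods that is a key of _pos has an empty mass list, so _mods[v][0] fails.
def Pre_generate_vstack (_mods : List (String × List Int)) (_pos : List (String × List Int)) (_depth : Int) : Prop :=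
  (1 ≤ _depth ∧ ∃ k ∈ (PySem.Dict.ofList _mods).keys, (PySem.Dict.ofList _pos).getD k [] ≠ []) →
  ∀ k ∈ (PySem.Dict.ofList _mods).keys, (PySem.Dict.ofList _pos).contains k → (PySem.Dict.ofList _mods).getD k [] ≠ []
instance (_mods : List (String × List Int)) (_pos : List (String × List Int)) (_depth : Int) : Decidable (Pre_generate_vstack _mods _pos _depth) := by unfold Pre_generate_vstack; infer_instance

def pvWitness_generate_vstack : (List (String × List Int)) × (List (String × List Int)) × Int :=
  ([("A", [10]), ("N", [984])], [("A", [1, 3]), ("N", [2])], 2)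

def Spec_generate_vstack (_mods : List (String × List Int)) (_pos : List (String × List Int)) (_depth : Int) (out : List ((List (String × List Int)) × Int)) : Prop := out = generate_vstack_alt _mods _pos _depth
instance (_mods : List (String × List Int)) (_pos : List (String × List Int)) (_depth : Int) (out : List ((List (String × List Int)) × Int)) : Decidable (Spec_generate_vstack _mods _pos _depth out) := by unfold Spec_generate_vstack; infer_instance

-- ===== CLAIM (what is proved, stated in full; the proofs are below) =====
def Claim_equal_generate_vstack : Prop := ∀ (_mods : List (String × List Int)) (_pos : List (String × List Int)) (_depth : Int), Dom_generate_vstack _mods _pos _depth → Pre_generate_vstack _mods _pos _depth → Spec_generate_vstack _mods _pos _depth (generate_vstack _mods _pos _depth)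
-- ===== LEMMAS AND PROOFS =====

-- spec-level vocabulary shared by the two directions of the proof
def gvRes (mods pos : PySem.Dict String (List Int)) : List String :=
  mods.keys.filter (fun v => pos.contains v)
def gvMaster (mods pos : PySem.Dict String (List Int)) : List (String × Int) :=
  (gvRes mods pos).flatMap (fun v => (pos.getD v []).map (fun p => (v, p)))
def gvMass (mods : PySem.Dict String (List Int)) (v : String) : Int := (mods.getD v []).headD 0
def gvGrp (ml : List (String × Int)) (v : String) : List Int :=
  (ml.filter (fun x => x.1 == v)).map (fun x => x.2)
def gvDm (mods : PySem.Dict String (List Int)) (ml : List (String × Int)) : Int :=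
  (ml.map (fun x => gvMass mods x.1)).sum
def gvDeam (mods : PySem.Dict String (List Int)) (ml : List (String × Int)) : Int :=
  (ml.map (fun x => if gvMass mods x.1 == 984 then (1 : Int) else 0)).sum
def gvVs (mods pos : PySem.Dict String (List Int)) (ml : List (String × Int)) : PySem.Dict String (List Int) :=
  PySem.Dict.mk ((gvRes mods pos).map (fun v => (v, gvGrp ml v)))
def gvEntry (mods pos : PySem.Dict String (List Int)) (ml : List (String × Int)) : (List (String × List Int)) × Int :=
  ((gvRes mods pos).map (fun v => (v, gvGrp ml v)), gvDm mods ml)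
def gvEmit (mods pos : PySem.Dict String (List Int)) (c : List (String × Int)) (rest : List (String × Int)) (k : Nat) : List ((List (String × List Int)) × Int) :=
  ((pyCombos k rest).filter (fun e => decide (gvDeam mods (c ++ e) ≤ 1))).map (fun e => gvEntry mods pos (c ++ e))

theorem gvRes_nodup (mods pos : PySem.Dict String (List Int)) (hk : mods.keys.Nodup) : (gvRes mods pos).Nodup :=
  hk.filter _

theorem gvMaster_keys (mods pos : PySem.Dict String (List Int)) :
    ∀ x ∈ gvMaster mods pos, x.1 ∈ gvRes mods pos := by
  intro x hx
  simp only [gvMaster, List.mem_flatMap, List.mem_map] at hx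
  obtain ⟨v, hv, p, _, rfl⟩ := hx
  exact hv

theorem pyCombos_sublist {α : Type} (n : Nat) (l : List α) (c : List α) (h : c ∈ pyCombos n l) :
    c.Sublist l := by
  induction l generalizing n c with
  | nil =>
    cases n with
    | zero => simp [pyCombos] at h; simp [h]
    | succ m => simp [pyCombos] at h
  | cons x xs ih =>
    cases n with
    | zero => simp [pyCombos] at h; simp [h]
    | succ m =>
      simp only [pyCombos, List.mem_append, List.mem_map] at h
      rcases h with ⟨c', hc', rfl⟩ | h
      · exact (ih m c' hc').cons₂ x
      · exact (ih (m + 1) c h).cons x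

theorem pyCombos_nil_of_lt {α : Type} (n : Nat) (l : List α) (h : l.length < n) :
    pyCombos n l = [] := by
  induction l generalizing n with
  | nil =>
    cases n with
    | zero => omega
    | succ m => rfl
  | cons x xs ih =>
    cases n with
    | zero => omega
    | succ m =>
      have h1 : xs.length < m := by simpa using h
      have h2 : xs.length < m + 1 := by omega
      simp [pyCombos, ih m h1, ih (m + 1) h2]

theorem gvDeam_nonneg (mods : PySem.Dict String (List Int)) (ml : List (String × Int)) :
    0 ≤ gvDeam mods ml := by
  unfold gvDeam
  apply List.sum_nonneg
  intro x hx
  simp only [List.mem_map] at hx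
  obtain ⟨y, _, rfl⟩ := hx
  split <;> omega

theorem gvDeam_append (mods : PySem.Dict String (List Int)) (a b : List (String × Int)) :
    gvDeam mods (a ++ b) = gvDeam mods a + gvDeam mods b := by
  simp [gvDeam]

theorem gvDm_append (mods : PySem.Dict String (List Int)) (a b : List (String × Int)) :
    gvDm mods (a ++ b) = gvDm mods a + gvDm mods b := by
  simp [gvDm]

-- sum over a list with at most one matching element
theorem gv_sum_if_unique (l : List String) (a : String) (f : String → Int)
    (hnd : l.Nodup) (ha : a ∈ l) :
    (l.map (fun v => if a == v then f v else 0)).sum = f a := by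
  induction l with
  | nil => simp at ha
  | cons b l ih =>
    rw [List.nodup_cons] at hnd
    rcases List.mem_cons.mp ha with rfl | hal
    · simp only [List.map_cons, List.sum_cons, BEq.rfl, if_pos]
      have hz : (l.map (fun v => if a == v then f v else 0)).sum = 0 := by
        apply List.sum_eq_zero
        intro x hx
        simp only [List.mem_map] at hx
        obtain ⟨v, hv, rfl⟩ := hx
        have : ¬ (a == v) = true := by
          intro hb
          exact hnd.1 (by simpa using ((beq_iff_eq).mp hb ▸ hv))
        simp [this]
      rw [hz]; simp
    · have hab : ¬ (a == b) = true := by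
        intro hb
        have : a = b := beq_iff_eq.mp hb
        subst this
        exact hnd.1 hal
      simp only [List.map_cons, List.sum_cons, hab, if_neg, Bool.false_eq_true, not_false_iff]
      rw [ih hnd.2 hal]
      simp

theorem gvGrp_cons (x : String × Int) (ml : List (String × Int)) (v : String) :
    gvGrp (x :: ml) v = (if x.1 == v then [x.2] else []) ++ gvGrp ml v := by
  simp only [gvGrp, List.filter_cons]
  split <;> simp

-- grouped sums over residues = elementwise sums over the combination
theorem gv_dm_grouped (mods pos : PySem.Dict String (List Int)) (ml : List (String × Int))
    (hnd : (gvRes mods pos).Nodup)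
    (h : ∀ x ∈ ml, x.1 ∈ gvRes mods pos) :
    ((gvRes mods pos).map (fun v => gvMass mods v * ((gvGrp ml v).length : Int))).sum = gvDm mods ml := by
  induction ml with
  | nil =>
    rw [show gvDm mods [] = 0 from rfl]
    apply List.sum_eq_zero
    intro x hx
    simp only [List.mem_map] at hx
    obtain ⟨v, _, rfl⟩ := hx
    simp [gvGrp]
  | cons x ml ih =>
    have hx1 : x.1 ∈ gvRes mods pos := h x (List.mem_cons_self)
    have hml : ∀ y ∈ ml, y.1 ∈ gvRes mods pos := fun y hy => h y (List.mem_cons_of_mem _ hy)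
    have hfun : ∀ v ∈ gvRes mods pos,
        gvMass mods v * ((gvGrp (x :: ml) v).length : Int)
        = gvMass mods v * ((gvGrp ml v).length : Int) + (if x.1 == v then gvMass mods v else 0) := by
      intro v _
      rw [gvGrp_cons]
      by_cases hv : (x.1 == v) = true
      · simp [hv]; ring
      · simp [hv]
    rw [List.map_congr_left hfun, PySem.List.sum_map_add_int,
        gv_sum_if_unique _ _ _ hnd hx1, ih hml]
    simp only [gvDm, List.map_cons, List.sum_cons]
    ring

theorem gv_deam_grouped (mods pos : PySem.Dict String (List Int)) (ml : List (String × Int))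
    (hnd : (gvRes mods pos).Nodup)
    (h : ∀ x ∈ ml, x.1 ∈ gvRes mods pos) :
    ((gvRes mods pos).map (fun v => if gvMass mods v == 984 then ((gvGrp ml v).length : Int) else 0)).sum = gvDeam mods ml := by
  induction ml with
  | nil =>
    rw [show gvDeam mods [] = 0 from rfl]
    apply List.sum_eq_zero
    intro x hx
    simp only [List.mem_map] at hx
    obtain ⟨v, _, rfl⟩ := hx
    simp [gvGrp]
  | cons x ml ih =>
    have hx1 : x.1 ∈ gvRes mods pos := h x (List.mem_cons_self)
    have hml : ∀ y ∈ ml, y.1 ∈ gvRes mods pos := fun y hy => h y (List.mem_cons_of_mem _ hy)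
    have hfun : ∀ v ∈ gvRes mods pos,
        (if gvMass mods v == 984 then ((gvGrp (x :: ml) v).length : Int) else 0)
        = (if gvMass mods v == 984 then ((gvGrp ml v).length : Int) else 0)
          + (if x.1 == v then (if gvMass mods v == 984 then (1 : Int) else 0) else 0) := by
      intro v _
      rw [gvGrp_cons]
      by_cases hv : (x.1 == v) = true <;> by_cases hm : (gvMass mods v == 984) = true <;>
        simp [hv, hm]
    rw [List.map_congr_left hfun, PySem.List.sum_map_add_int,
        gv_sum_if_unique _ _ (fun v => if gvMass mods v == 984 then (1 : Int) else 0) hnd hx1, ih hml]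
    simp only [gvDeam, List.map_cons, List.sum_cons]
    ring

theorem gvVs_keys (mods pos : PySem.Dict String (List Int)) (ml : List (String × Int)) :
    (gvVs mods pos ml).keys = gvRes mods pos := by
  simp [gvVs, PySem.Dict.keys, Function.comp_def]

theorem gvVs_getD (mods pos : PySem.Dict String (List Int)) (ml : List (String × Int))
    (hnd : (gvRes mods pos).Nodup) (v : String) (hv : v ∈ gvRes mods pos) :
    (gvVs mods pos ml).getD v [] = gvGrp ml v := by
  apply PySem.Dict.getD_of_mem_items
  · exact List.mem_map_of_mem hv
  · rw [gvVs_keys]; exact hnd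

theorem gvVs_step (mods pos : PySem.Dict String (List Int)) (ml : List (String × Int))
    (hnd : (gvRes mods pos).Nodup)
    (r : String) (p : Int) (hr : r ∈ gvRes mods pos) :
    (gvVs mods pos ml).modify r [] (fun b => b ++ [p]) = gvVs mods pos (ml ++ [(r, p)]) := by
  apply PySem.Dict.ext
  have hcont : (gvVs mods pos ml).contains r = true := by
    rw [PySem.Dict.contains_iff_mem_keys, gvVs_keys]; exact hr
  have hkeys : ((gvVs mods pos ml).modify r [] (fun b => b ++ [p])).keys = gvRes mods pos := by
    rw [PySem.Dict.keys_modify, PySem.Dict.keys_insert_of_contains _ _ hcont, gvVs_keys]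
  have hknd : ((gvVs mods pos ml).modify r [] (fun b => b ++ [p])).keys.Nodup := by
    rw [hkeys]; exact hnd
  rw [PySem.Dict.items_eq_map_keys _ hknd []]
  rw [hkeys]
  rw [show (gvVs mods pos (ml ++ [(r, p)])).items
      = (gvRes mods pos).map (fun v => (v, gvGrp (ml ++ [(r, p)]) v)) from rfl]
  apply List.map_congr_left
  intro v hv
  rw [PySem.Dict.getD_modify]
  by_cases hvr : v = r
  · subst hvr
    rw [if_pos rfl, gvVs_getD mods pos ml hnd v hv]
    have hg : gvGrp (ml ++ [(v, p)]) v = gvGrp ml v ++ [p] := by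
      simp [gvGrp, List.filter_append]
    rw [hg]
  · rw [if_neg hvr, gvVs_getD mods pos ml hnd v hv]
    have hb : ¬ (r == v) = true := by
      simp only [beq_iff_eq]
      exact fun hh => hvr hh.symm
    have hg : gvGrp (ml ++ [(r, p)]) v = gvGrp ml v := by
      simp [gvGrp, List.filter_append, hb]
    rw [hg]

-- two loop shapes used by the ports
theorem gv_foldl_ite_add (l : List String) (p : String → Bool) (g : String → Int) :
    ∀ a : Int, l.foldl (fun acc v => if p v then acc + g v else acc) a
      = a + (l.map (fun v => if p v then g v else 0)).sum := by
  induction l with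
  | nil => simp
  | cons x xs ih =>
    intro a
    by_cases h : p x <;> simp [h, ih] <;> ring

theorem gv_foldl_append_ite {β : Type} (l : List String) (p : String → Bool) (g : String → List β) :
    ∀ acc : List β, l.foldl (fun m v => if p v then m ++ g v else m) acc
      = acc ++ (l.filter p).flatMap g := by
  induction l with
  | nil => simp
  | cons x xs ih =>
    intro acc
    by_cases h : p x <;> simp [h, ih]

-- A's inner per-combination fold computes exactly the spec entry
theorem gvA_inner (mods pos : PySem.Dict String (List Int)) (ml : List (String × Int))
    (hk : mods.keys.Nodup)
    (h : ∀ x ∈ ml, x.1 ∈ gvRes mods pos) :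
    (mods.keys.foldl
      (fun (st : PySem.Dict String (List Int) × Int × Int) v =>
        if pos.contains v then
          (st.1.insert v ((ml.filter (fun x => x.1 == v)).map (fun x => x.2)),
           st.2.1 + (mods.getD v []).headD 0 * (((ml.filter (fun x => x.1 == v)).map (fun x => x.2)).length : Int),
           if (mods.getD v []).headD 0 == 984 then st.2.2 + (((ml.filter (fun x => x.1 == v)).map (fun x => x.2)).length : Int) else st.2.2)
        else st)
      (PySem.Dict.empty, 0, 0)) = (gvVs mods pos ml, gvDm mods ml, gvDeam mods ml) := by
  have hnd : (gvRes mods pos).Nodup := gvRes_nodup mods pos hk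
  rw [← List.foldl_filter]
  rw [show mods.keys.filter (fun v => pos.contains v) = gvRes mods pos from rfl]
  rw [PySem.List.foldl_prod_mk
    (fun (d : PySem.Dict String (List Int)) v => d.insert v ((ml.filter (fun x => x.1 == v)).map (fun x => x.2)))
    (fun (st : Int × Int) v =>
      (st.1 + (mods.getD v []).headD 0 * (((ml.filter (fun x => x.1 == v)).map (fun x => x.2)).length : Int),
       if (mods.getD v []).headD 0 == 984 then st.2 + (((ml.filter (fun x => x.1 == v)).map (fun x => x.2)).length : Int) else st.2))]
  rw [PySem.List.foldl_prod_mk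
    (fun (a : Int) v => a + (mods.getD v []).headD 0 * (((ml.filter (fun x => x.1 == v)).map (fun x => x.2)).length : Int))
    (fun (a : Int) v => if (mods.getD v []).headD 0 == 984 then a + (((ml.filter (fun x => x.1 == v)).map (fun x => x.2)).length : Int) else a)]
  refine Prod.ext ?_ (Prod.ext ?_ ?_)
  · show _ = gvVs mods pos ml
    apply PySem.Dict.ext
    rw [PySem.Dict.items_foldl_insert_fresh (gvRes mods pos) (fun v => v)
      (fun v => ((ml.filter (fun x => x.1 == v)).map (fun x => x.2))) PySem.Dict.empty
      (fun a _ => PySem.Dict.contains_empty a) (by simpa using hnd)]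
    rw [show PySem.Dict.empty.items = ([] : List (String × List Int)) from rfl]
    simp [gvVs, gvGrp]
  · show _ = gvDm mods ml
    rw [PySem.List.foldl_add]
    show 0 + ((gvRes mods pos).map (fun v => gvMass mods v * ((gvGrp ml v).length : Int))).sum = gvDm mods ml
    rw [gv_dm_grouped mods pos ml hnd h]
    simp
  · show _ = gvDeam mods ml
    rw [gv_foldl_ite_add (gvRes mods pos) (fun v => (mods.getD v []).headD 0 == 984)
      (fun v => (((ml.filter (fun x => x.1 == v)).map (fun x => x.2)).length : Int)) 0]
    show 0 + ((gvRes mods pos).map (fun v => if gvMass mods v == 984 then ((gvGrp ml v).length : Int) else 0)).sum = gvDeam mods ml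
    rw [gv_deam_grouped mods pos ml hnd h]
    simp

-- A's first loop computes the all-keys empty dict and the master list
theorem gvA_first (mods pos : PySem.Dict String (List Int)) (hk : mods.keys.Nodup) :
    (mods.keys.foldl
      (fun (st : PySem.Dict String (List Int) × List (String × Int)) v =>
        (st.1.insert v ([] : List Int),
         if pos.contains v then st.2 ++ (pos.getD v []).map (fun p => (v, p)) else st.2))
      (PySem.Dict.empty, [])) =
    (PySem.Dict.mk (mods.keys.map (fun v => (v, ([] : List Int)))), gvMaster mods pos) := by
  rw [PySem.List.foldl_prod_mk
    (fun (d : PySem.Dict String (List Int)) v => d.insert v ([] : List Int))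
    (fun (m : List (String × Int)) v => if pos.contains v then m ++ (pos.getD v []).map (fun p => (v, p)) else m)]
  refine Prod.ext ?_ ?_
  · apply PySem.Dict.ext
    rw [PySem.Dict.items_foldl_insert_fresh mods.keys (fun v => v)
      (fun _ => ([] : List Int)) PySem.Dict.empty
      (fun a _ => PySem.Dict.contains_empty a) (by simpa using hk)]
    rw [show PySem.Dict.empty.items = ([] : List (String × List Int)) from rfl]
    simp
  · show _ = gvMaster mods pos
    rw [gv_foldl_append_ite mods.keys (fun v => pos.contains v)
      (fun v => (pos.getD v []).map (fun p => (v, p))) []]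
    simp only [List.nil_append]
    rfl

theorem gv_getD_modify (l : List (List ((List (String × List Int)) × Int))) (i s : Nat)
    (f : List ((List (String × List Int)) × Int) → List ((List (String × List Int)) × Int)) :
    (l.modify i f).getD s [] = if i = s ∧ s < l.length then f (l.getD s []) else l.getD s [] := by
  induction l generalizing i s with
  | nil => simp [List.modify]
  | cons x xs ih =>
    cases i with
    | zero =>
      cases s with
      | zero => simp
      | succ s => simp
    | succ i =>
      cases s with
      | zero => simp
      | succ s =>
        simp only [List.modify_cons]
        rw [if_neg (by omega : ¬ (i + 1 = 0))]
        simp only [Nat.add_sub_cancel, List.getD_cons_succ, List.length_cons]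
        rw [ih i s]
        by_cases h : i = s ∧ s < xs.length
        · rw [if_pos h, if_pos (by omega)]
        · rw [if_neg h, if_neg (by omega)]

theorem vstackExtend_length (mods : PySem.Dict String (List Int)) (maxd : Nat) :
    ∀ (fuel : Nat) (rest : List (String × Int)) vs size dm deam buckets,
    (vstackExtend mods maxd fuel rest vs size dm deam buckets).length = buckets.length := by
  intro fuel
  induction fuel with
  | zero =>
    intro rest vs size dm deam buckets
    cases rest <;> simp [vstackExtend]
  | succ n ih =>
    intro rest vs size dm deam buckets
    cases rest with
    | nil => simp [vstackExtend]
    | cons x xs =>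
      obtain ⟨r, p⟩ := x
      simp only [vstackExtend]
      rw [ih]
      split_ifs <;> simp [ih, List.length_modify]

-- one step of the combination list, with the per-branch deamidation filter
theorem gvEmit_cons (mods pos : PySem.Dict String (List Int)) (c : List (String × Int))
    (r : String) (p : Int) (xs : List (String × Int)) (k : Nat) :
    gvEmit mods pos c ((r, p) :: xs) (k + 1)
    = (gvEmit mods pos (c ++ [(r, p)]) xs k) ++ gvEmit mods pos c xs (k + 1) := by
  have hf : (fun e => gvEntry mods pos (c ++ (r, p) :: e))
      = (fun e : List (String × Int) => gvEntry mods pos ((c ++ [(r, p)]) ++ e)) := by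
    funext e
    rw [show c ++ (r, p) :: e = (c ++ [(r, p)]) ++ e by simp]
  have hp : (fun e => decide (gvDeam mods (c ++ (r, p) :: e) ≤ 1))
      = (fun e : List (String × Int) => decide (gvDeam mods ((c ++ [(r, p)]) ++ e) ≤ 1)) := by
    funext e
    rw [show c ++ (r, p) :: e = (c ++ [(r, p)]) ++ e by simp]
  simp only [gvEmit, pyCombos, List.filter_append, List.map_append, List.filter_map,
    List.map_map, Function.comp_def]
  rw [hf, hp]

-- a pruned branch emits nothing
theorem gvEmit_pruned (mods pos : PySem.Dict String (List Int)) (c : List (String × Int))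
    (r : String) (p : Int) (xs : List (String × Int)) (k : Nat)
    (h : 1 < gvDeam mods (c ++ [(r, p)])) :
    gvEmit mods pos (c ++ [(r, p)]) xs k = [] := by
  unfold gvEmit
  rw [List.map_eq_nil_iff, List.filter_eq_nil_iff]
  intro e _
  simp only [decide_eq_true_eq]
  rw [gvDeam_append]
  have h2 := gvDeam_nonneg mods e
  omega

theorem gvEmit_zero (mods pos : PySem.Dict String (List Int)) (c : List (String × Int))
    (rest : List (String × Int)) (h : gvDeam mods c ≤ 1) :
    gvEmit mods pos c rest 0 = [gvEntry mods pos c] := by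
  simp [gvEmit, pyCombos, h]

theorem gvEmit_nil (mods pos : PySem.Dict String (List Int)) (c : List (String × Int)) (k : Nat) :
    gvEmit mods pos c [] (k + 1) = [] := by
  simp [gvEmit, pyCombos]

-- the DFS invariant: extend appends, bucket by bucket, exactly the admissible
-- extensions of the current prefix, in combination order
theorem vstackExtend_spec (mods pos : PySem.Dict String (List Int)) (maxd : Nat)
    (hnd : (gvRes mods pos).Nodup) :
    ∀ (fuel : Nat) (rest : List (String × Int)), rest.length ≤ fuel →
    ∀ (c : List (String × Int)) (buckets : List (List ((List (String × List Int)) × Int))),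
    (∀ x ∈ rest, x.1 ∈ gvRes mods pos) → (∀ x ∈ c, x.1 ∈ gvRes mods pos) →
    gvDeam mods c ≤ 1 → c.length < maxd → buckets.length = maxd + 1 →
    ∀ s : Nat,
      (vstackExtend mods maxd fuel rest (gvVs mods pos c) c.length (gvDm mods c) (gvDeam mods c) buckets).getD s []
      = buckets.getD s [] ++ (if c.length + 1 ≤ s ∧ s ≤ maxd then gvEmit mods pos c rest (s - c.length) else []) := by
  intro fuel
  induction fuel with
  | zero =>
    intro rest hlen c buckets hrest hc hdeam hclen hblen s
    have hnil : rest = [] := List.eq_nil_of_length_eq_zero (Nat.le_zero.mp hlen)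
    subst hnil
    rw [show vstackExtend mods maxd 0 [] (gvVs mods pos c) c.length (gvDm mods c) (gvDeam mods c) buckets = buckets from rfl]
    by_cases hcond : c.length + 1 ≤ s ∧ s ≤ maxd
    · rw [if_pos hcond]
      rw [show s - c.length = (s - c.length - 1) + 1 by omega, gvEmit_nil]
      simp
    · rw [if_neg hcond]; simp
  | succ n ih =>
    intro rest hlen c buckets hrest hc hdeam hclen hblen s
    cases rest with
    | nil =>
      rw [show vstackExtend mods maxd (n + 1) [] (gvVs mods pos c) c.length (gvDm mods c) (gvDeam mods c) buckets = buckets from rfl]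
      by_cases hcond : c.length + 1 ≤ s ∧ s ≤ maxd
      · rw [if_pos hcond]
        rw [show s - c.length = (s - c.length - 1) + 1 by omega, gvEmit_nil]
        simp
      · rw [if_neg hcond]; simp
    | cons x xs =>
      obtain ⟨r, p⟩ := x
      have hxs : xs.length ≤ n := by simpa using hlen
      have hrR : r ∈ gvRes mods pos := hrest (r, p) List.mem_cons_self
      have hxsR : ∀ y ∈ xs, y.1 ∈ gvRes mods pos := fun y hy => hrest y (List.mem_cons_of_mem _ hy)
      have hcR : ∀ y ∈ c ++ [(r, p)], y.1 ∈ gvRes mods pos := by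
        intro y hy
        rcases List.mem_append.mp hy with hy | hy
        · exact hc y hy
        · simp at hy; subst hy; exact hrR
      have hndc : gvDeam mods (c ++ [(r, p)])
          = gvDeam mods c + (if (mods.getD r []).headD 0 == 984 then 1 else 0) := by
        rw [gvDeam_append]
        simp [gvDeam, gvMass]
      simp only [vstackExtend]
      by_cases hprune : 1 < gvDeam mods c + (if (mods.getD r []).headD 0 == 984 then (1 : Int) else 0)
      · rw [if_pos hprune]
        rw [ih xs hxs c buckets hxsR hc hdeam hclen hblen s]
        congr 1
        by_cases hcond : c.length + 1 ≤ s ∧ s ≤ maxd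
        · rw [if_pos hcond, if_pos hcond]
          rw [show s - c.length = (s - c.length - 1) + 1 by omega, gvEmit_cons]
          rw [gvEmit_pruned mods pos c r p xs _ (by rw [hndc]; exact hprune)]
          rw [List.nil_append]
        · rw [if_neg hcond, if_neg hcond]
      · rw [if_neg hprune]
        have hnd1 : gvDeam mods (c ++ [(r, p)]) ≤ 1 := by rw [hndc]; omega
        rw [gvVs_step mods pos c hnd r p hrR]
        have hblen' : (buckets.modify (c.length + 1)
            (fun b => b ++ [((gvVs mods pos (c ++ [(r, p)])).items, gvDm mods c + (mods.getD r []).headD 0)])).length = maxd + 1 := by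
          rw [List.length_modify]; exact hblen
        have hentry : ((gvVs mods pos (c ++ [(r, p)])).items, gvDm mods c + (mods.getD r []).headD 0)
            = gvEntry mods pos (c ++ [(r, p)]) := by
          rw [gvEntry, gvDm_append]
          simp [gvVs, gvDm, gvMass]
        set bmod := buckets.modify (c.length + 1)
            (fun b => b ++ [((gvVs mods pos (c ++ [(r, p)])).items, gvDm mods c + (mods.getD r []).headD 0)]) with hbmod
        have hbget : ∀ t : Nat, bmod.getD t []
            = buckets.getD t [] ++ (if c.length + 1 = t ∧ t < maxd + 1 then [gvEntry mods pos (c ++ [(r, p)])] else []) := by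
          intro t
          rw [hbmod, gv_getD_modify, hblen]
          by_cases ht : c.length + 1 = t ∧ t < maxd + 1
          · rw [if_pos ht, if_pos ht, hentry]
          · rw [if_neg ht, if_neg ht]; simp
        have harg2 : gvDm mods c + (mods.getD r []).headD 0 = gvDm mods (c ++ [(r, p)]) := by
          rw [gvDm_append]; simp [gvDm, gvMass]
        have harg3 : (gvDeam mods c + if ((mods.getD r []).headD 0 == 984) = true then (1 : Int) else 0)
            = gvDeam mods (c ++ [(r, p)]) := hndc.symm
        have hinner : ∀ t : Nat,
            (if c.length + 1 < maxd then
              vstackExtend mods maxd n xs (gvVs mods pos (c ++ [(r, p)])) (c.length + 1)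
                (gvDm mods c + (mods.getD r []).headD 0)
                (gvDeam mods c + if ((mods.getD r []).headD 0 == 984) = true then (1 : Int) else 0) bmod
             else bmod).getD t []
            = buckets.getD t []
              ++ (if c.length + 1 ≤ t ∧ t ≤ maxd then gvEmit mods pos (c ++ [(r, p)]) xs (t - (c.length + 1)) else []) := by
          intro t
          by_cases hlt : c.length + 1 < maxd
          · rw [if_pos hlt, harg2, harg3]
            rw [show (c.length + 1) = (c ++ [(r, p)]).length by simp]
            have hcall := ih xs hxs (c ++ [(r, p)]) bmod hxsR hcR hnd1
              (by simp only [List.length_append, List.length_cons, List.length_nil]; omega) hblen' t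
            rw [hcall, hbget t]
            simp only [List.length_append, List.length_cons, List.length_nil, Nat.zero_add]
            by_cases ht : c.length + 1 = t ∧ t < maxd + 1
            · rw [if_pos ht]
              rw [if_neg (by omega : ¬ (c.length + 1 + 1 ≤ t ∧ t ≤ maxd))]
              rw [if_pos (by omega : c.length + 1 ≤ t ∧ t ≤ maxd)]
              rw [show t - (c.length + 1) = 0 by omega, gvEmit_zero mods pos _ xs hnd1]
              simp
            · rw [if_neg ht]
              simp only [List.append_nil]
              by_cases ht2 : c.length + 1 ≤ t ∧ t ≤ maxd
              · rw [if_pos (by omega : c.length + 1 + 1 ≤ t ∧ t ≤ maxd), if_pos ht2]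
              · rw [if_neg (by omega : ¬ (c.length + 1 + 1 ≤ t ∧ t ≤ maxd)), if_neg ht2]
          · rw [if_neg hlt]
            rw [hbget t]
            by_cases ht : c.length + 1 = t ∧ t < maxd + 1
            · rw [if_pos ht, if_pos (by omega : c.length + 1 ≤ t ∧ t ≤ maxd)]
              rw [show t - (c.length + 1) = 0 by omega, gvEmit_zero mods pos _ xs hnd1]
            · rw [if_neg ht, if_neg (by omega : ¬ (c.length + 1 ≤ t ∧ t ≤ maxd))]
        have hilen : (if c.length + 1 < maxd then
              vstackExtend mods maxd n xs (gvVs mods pos (c ++ [(r, p)])) (c.length + 1)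
                (gvDm mods c + (mods.getD r []).headD 0)
                (gvDeam mods c + if ((mods.getD r []).headD 0 == 984) = true then (1 : Int) else 0) bmod
             else bmod).length = maxd + 1 := by
          by_cases hlt : c.length + 1 < maxd
          · rw [if_pos hlt, vstackExtend_length]; exact hblen'
          · rw [if_neg hlt]; exact hblen'
        rw [ih xs hxs c _ hxsR hc hdeam hclen hilen s]
        rw [hinner s]
        by_cases hcond : c.length + 1 ≤ s ∧ s ≤ maxd
        · rw [if_pos hcond, if_pos hcond, if_pos hcond]
          rw [show s - c.length = (s - c.length - 1) + 1 by omega]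
          rw [gvEmit_cons]
          rw [show s - c.length - 1 = s - (c.length + 1) by omega]
          rw [List.append_assoc]
        · rw [if_neg hcond, if_neg hcond, if_neg hcond]
          simp

theorem gv_pyRange_nil (a b : Int) (h : b ≤ a) : PySem.List.pyRange a b = [] := by
  rw [List.eq_nil_iff_forall_not_mem]
  intro x hx
  rw [PySem.List.mem_pyRange_one] at hx
  omega

theorem gv_pyRange_map : ∀ (n : Nat) (a : Int), PySem.List.pyRange a (a + n) = (List.range n).map (fun i : Nat => a + (i : Int)) := by
  intro n
  induction n with
  | zero =>
    intro a
    rw [show a + ((0 : Nat) : Int) = a by simp]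
    rw [gv_pyRange_nil a a le_rfl]
    rfl
  | succ m ih =>
    intro a
    rw [PySem.List.pyRange_one_cons (by omega)]
    rw [show a + ((m + 1 : Nat) : Int) = (a + 1) + (m : Nat) by push_cast; ring]
    rw [ih (a + 1)]
    rw [List.range_succ_eq_map]
    simp only [List.map_cons, List.map_map, Function.comp_def]
    congr 1
    · simp
    · apply List.map_congr_left
      intro i _
      push_cast
      ring

-- a flatMap over an index range may be cut where the function is empty
theorem gv_flatMap_range_drop {β : Type} (g : Nat → List β) :
    ∀ (D m : Nat), m ≤ D → (∀ i, m ≤ i → g i = []) → (List.range D).flatMap g = (List.range m).flatMap g := by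
  intro D
  induction D with
  | zero => intro m hm _; rw [Nat.le_zero.mp hm]
  | succ n ih =>
    intro m hm hz
    rcases Nat.eq_or_lt_of_le hm with rfl | hlt
    · rfl
    · have hmn : m ≤ n := by omega
      rw [List.range_succ, List.flatMap_append, ih m hmn hz]
      simp [hz n hmn]

-- ===== VERDICT (by name: the statement is the Claim_ definition above) =====
theorem generate_vstack_spec : Claim_equal_generate_vstack := by
  intro _mods _pos _depth _hdom _hpre
  unfold Spec_generate_vstack
  simp only [generate_vstack, generate_vstack_alt]
  set mods := PySem.Dict.ofList _mods with hmods
  set pos := PySem.Dict.ofList _pos with hpos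
  have hk : mods.keys.Nodup := PySem.Dict.nodup_keys_ofList _mods
  have hnd : (gvRes mods pos).Nodup := gvRes_nodup mods pos hk
  rw [gvA_first mods pos hk]
  rw [show (PySem.Dict.mk (mods.keys.map (fun v => (v, ([] : List Int))))).items
      = mods.keys.map (fun v => (v, ([] : List Int))) from rfl]
  rw [show mods.keys.filter (fun v => pos.contains v) = gvRes mods pos from rfl]
  rw [show (gvRes mods pos).flatMap (fun v => (pos.getD v []).map (fun p => (v, p))) = gvMaster mods pos from rfl]
  have hinit : (mods.keys.foldl (fun d v => d.insert v ([] : List Int)) PySem.Dict.empty).items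
      = mods.keys.map (fun v => (v, ([] : List Int))) := by
    rw [PySem.Dict.items_foldl_insert_fresh mods.keys (fun v => v)
      (fun _ => ([] : List Int)) PySem.Dict.empty
      (fun a _ => PySem.Dict.contains_empty a) (by simpa using hk)]
    rw [show PySem.Dict.empty.items = ([] : List (String × List Int)) from rfl]
    simp
  rw [hinit]
  have hvs0 : (gvRes mods pos).foldl (fun d v => d.insert v ([] : List Int)) PySem.Dict.empty
      = gvVs mods pos [] := by
    apply PySem.Dict.ext
    rw [PySem.Dict.items_foldl_insert_fresh (gvRes mods pos) (fun v => v)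
      (fun _ => ([] : List Int)) PySem.Dict.empty
      (fun a _ => PySem.Dict.contains_empty a) (by simpa using hnd)]
    rw [show PySem.Dict.empty.items = ([] : List (String × List Int)) from rfl]
    simp [gvVs, gvGrp]
  rw [hvs0]
  have hinner : ∀ (acc : List ((List (String × List Int)) × Int)) (dn : Nat),
      (pyCombos dn (gvMaster mods pos)).foldl (fun v_stack ml =>
        if (mods.keys.foldl
            (fun (st : PySem.Dict String (List Int) × Int × Int) v =>
              if pos.contains v then
                (st.1.insert v ((ml.filter (fun x => x.1 == v)).map (fun x => x.2)),
                 st.2.1 + (mods.getD v []).headD 0 * (((ml.filter (fun x => x.1 == v)).map (fun x => x.2)).length : Int),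
                 if (mods.getD v []).headD 0 == 984 then st.2.2 + (((ml.filter (fun x => x.1 == v)).map (fun x => x.2)).length : Int) else st.2.2)
              else st)
            (PySem.Dict.empty, 0, 0)).2.2 > 1 then v_stack
        else v_stack ++ [((mods.keys.foldl
            (fun (st : PySem.Dict String (List Int) × Int × Int) v =>
              if pos.contains v then
                (st.1.insert v ((ml.filter (fun x => x.1 == v)).map (fun x => x.2)),
                 st.2.1 + (mods.getD v []).headD 0 * (((ml.filter (fun x => x.1 == v)).map (fun x => x.2)).length : Int),
                 if (mods.getD v []).headD 0 == 984 then st.2.2 + (((ml.filter (fun x => x.1 == v)).map (fun x => x.2)).length : Int) else st.2.2)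
              else st)
            (PySem.Dict.empty, 0, 0)).1.items,
          (mods.keys.foldl
            (fun (st : PySem.Dict String (List Int) × Int × Int) v =>
              if pos.contains v then
                (st.1.insert v ((ml.filter (fun x => x.1 == v)).map (fun x => x.2)),
                 st.2.1 + (mods.getD v []).headD 0 * (((ml.filter (fun x => x.1 == v)).map (fun x => x.2)).length : Int),
                 if (mods.getD v []).headD 0 == 984 then st.2.2 + (((ml.filter (fun x => x.1 == v)).map (fun x => x.2)).length : Int) else st.2.2)
              else st)
            (PySem.Dict.empty, 0, 0)).2.1)]) acc
      = acc ++ gvEmit mods pos [] (gvMaster mods pos) dn := by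
    intro acc dn
    rw [PySem.List.foldl_congr_mem (pyCombos dn (gvMaster mods pos)) _
      (fun acc ml => if decide (gvDeam mods ml ≤ 1) = true then acc ++ [gvEntry mods pos ml] else acc) acc
      (by
        intro a ml hml
        have hkeys : ∀ x ∈ ml, x.1 ∈ gvRes mods pos := by
          intro x hx
          exact gvMaster_keys mods pos x ((pyCombos_sublist dn _ ml hml).mem hx)
        rw [gvA_inner mods pos ml hk hkeys]
        show (if gvDeam mods ml > 1 then a else a ++ [((gvVs mods pos ml).items, gvDm mods ml)])
          = (if decide (gvDeam mods ml ≤ 1) = true then a ++ [gvEntry mods pos ml] else a)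
        by_cases hd : 1 < gvDeam mods ml
        · rw [if_pos hd, if_neg (by simp only [decide_eq_true_eq]; omega)]
        · rw [if_neg hd, if_pos (by simp only [decide_eq_true_eq]; omega)]
          rfl)]
    rw [PySem.List.foldl_append_if]
    rfl
  rw [PySem.List.foldl_congr_mem (PySem.List.pyRange 1 (_depth + 1)) _
    (fun v_stack d => v_stack ++ gvEmit mods pos [] (gvMaster mods pos) d.toNat) _
    (fun acc d _ => hinner acc d.toNat)]
  rw [PySem.List.foldl_append_eq_flatMap]
  rw [PySem.List.foldl_append_eq_flatten]
  congr 1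
  set maxd := (min _depth ((gvMaster mods pos).length : Int)).toNat with hmaxd
  have hB0get : ∀ s : Nat, (List.replicate (maxd + 1) ([] : List ((List (String × List Int)) × Int))).getD s [] = [] := by
    intro s
    by_cases h : s < maxd + 1
    · rw [List.getD_eq_getElem?_getD, List.getElem?_replicate]
      simp [h]
    · rw [List.getD_eq_getElem?_getD,
        List.getElem?_eq_none (by simpa using Nat.le_of_not_lt h)]
      rfl
  by_cases hmp : 0 < maxd
  · rw [if_pos hmp]
    have hspec := vstackExtend_spec mods pos maxd hnd (gvMaster mods pos).length (gvMaster mods pos)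
      (le_refl _) [] (List.replicate (maxd + 1) [])
      (gvMaster_keys mods pos) (by intro x hx; simp at hx)
      (by simp [gvDeam]) (by simpa using hmp) (by simp)
    set bk := vstackExtend mods maxd (gvMaster mods pos).length (gvMaster mods pos)
      (gvVs mods pos []) 0 0 0 (List.replicate (maxd + 1) []) with hbk
    have hbget : ∀ s : Nat, bk.getD s []
        = if 0 + 1 ≤ s ∧ s ≤ maxd then gvEmit mods pos [] (gvMaster mods pos) (s - 0) else [] := by
      intro s
      have hh := hspec s
      rw [hB0get s, List.nil_append] at hh
      exact hh
    have hbklen : bk.length = maxd + 1 := by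
      rw [hbk, vstackExtend_length]; simp
    have hdrop : bk.drop 1 = (List.range maxd).map (fun i => gvEmit mods pos [] (gvMaster mods pos) (i + 1)) := by
      apply List.ext_getElem
      · simp [hbklen]
      · intro i h1 h2
        have hi : i < maxd := by simpa using h2
        rw [List.getElem_drop]
        rw [← List.getD_eq_getElem bk [] (by rw [hbklen]; omega)]
        rw [hbget (1 + i)]
        rw [if_pos (by omega : 0 + 1 ≤ 1 + i ∧ 1 + i ≤ maxd)]
        rw [show 1 + i - 0 = i + 1 by omega]
        simp
    rw [hdrop]
    rw [← List.flatMap_def]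
    have hminle := min_le_left _depth ((gvMaster mods pos).length : Int)
    have hminle2 := min_le_right _depth ((gvMaster mods pos).length : Int)
    have hD1 : 1 ≤ _depth := by omega
    rw [show _depth + 1 = 1 + ((_depth.toNat : Nat) : Int) by omega]
    rw [gv_pyRange_map _depth.toNat 1]
    rw [List.flatMap_map]
    have h1i : ∀ i : Nat, ((1 : Int) + (i : Int)).toNat = i + 1 := by intro i; omega
    simp only [h1i]
    have hch := min_choice _depth ((gvMaster mods pos).length : Int)
    have hcut : maxd = _depth.toNat ∨ maxd = (gvMaster mods pos).length := by
      rcases hch with h | h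
      · left; rw [hmaxd, h]
      · right; rw [hmaxd, h]; simp
    rcases hcut with hcut | hcut
    · rw [hcut]
    · rw [gv_flatMap_range_drop (fun i => gvEmit mods pos [] (gvMaster mods pos) (i + 1))
        _depth.toNat maxd (by omega)
        (fun i hi => by
          have hlt : (gvMaster mods pos).length < i + 1 := by omega
          simp [gvEmit, pyCombos_nil_of_lt _ _ hlt])]
  · rw [if_neg hmp]
    have hmz : maxd = 0 := by omega
    rw [hmz]
    rw [show (List.replicate (0 + 1) ([] : List ((List (String × List Int)) × Int))).drop 1
        = [] from rfl]
    rw [show ([] : List (List ((List (String × List Int)) × Int))).flatten = [] from rfl]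
    have hminle := min_le_left _depth ((gvMaster mods pos).length : Int)
    have hminle2 := min_le_right _depth ((gvMaster mods pos).length : Int)
    by_cases hd : _depth ≤ 0
    · rw [gv_pyRange_nil 1 (_depth + 1) (by omega)]
      rfl
    · have hml : (gvMaster mods pos).length = 0 := by
        have hch := min_choice _depth ((gvMaster mods pos).length : Int)
        rcases hch with h | h <;> omega
      rw [List.flatMap_eq_nil_iff.mpr ?_]
      intro d hdm
      rw [PySem.List.mem_pyRange_one] at hdm
      have h1 : (gvMaster mods pos).length < d.toNat := by omega
      simp [gvEmit, pyCombos_nil_of_lt _ _ h1]
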